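-- pv_equiv track=rewrite | github.com/hosepud/My_repo | single_use_scripts/ulam_spiral.py | fill_picture_dict
-- ===== SOURCE A (Python) =====
-- def fill_square(n, start, x, y, d):
--     if n == 1:
--         d[x,y] = start
--         return start,x,y
--     for i in range(n):
--         d[x,y] = start
--         start-=1
--         x-=1
--     x+=1
--     y-=1
--     for i in range(n-1):
--         d[x,y] = start
--         start-=1
--         y-=1
--     x+=1
--     y+=1
--     for i in range(n-1):
--         d[x,y] = start
--         start-=1
--         x+=1
--     y += 1
--     x -= 1
--     for i in range(n-2):
--         d[x,y] = start
--         start -= 1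
--         y += 1
--     return start
--
-- def fill_picture_dict(n):
--     d = {}
--     start = n*n
--     x = n-1
--     y = n-1
--     for i in range(n, -1, -2):
--         start = fill_square(i, start, x, y, d)
--         x = x-1
--         y = y-1
--     return d
-- ===== SOURCE B (Python) =====
-- def fill_picture_dict(n):
--     # Single continuous spiral walk driven by precomputed run lengths
--     # (n, n-1, n-1, n-2, n-2, ..., 1, 1) instead of ring-by-ring decomposition.
--     out = {}
--     dirs = ((-1, 0), (0, -1), (1, 0), (0, 1))
--     runs = [n]
--     for k in range(n - 1, 0, -1):
--         runs.append(k)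
--         runs.append(k)
--     x = y = n - 1
--     v = n * n
--     di = 0
--     for L in runs:
--         dx, dy = dirs[di]
--         ndx, ndy = dirs[(di + 1) % 4]
--         for _ in range(L):
--             out[x, y] = v
--             v -= 1
--             x += dx
--             y += dy
--         x += ndx - dx
--         y += ndy - dy
--         di = (di + 1) % 4
--     return out
-- ===== Notes on version B (the rewrite author's own statement) =====
-- stated objective: alternative
-- what changed: Replaces the ring-by-ring decomposition (helper fill_square writing one square ring per call) with a single continuous spiral walk over a precomputed run-length list [n, n-1, n-1, ..., 1, 1] and a cycling direction table, with no per-ring helper or special center case.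
import Mathlib
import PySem

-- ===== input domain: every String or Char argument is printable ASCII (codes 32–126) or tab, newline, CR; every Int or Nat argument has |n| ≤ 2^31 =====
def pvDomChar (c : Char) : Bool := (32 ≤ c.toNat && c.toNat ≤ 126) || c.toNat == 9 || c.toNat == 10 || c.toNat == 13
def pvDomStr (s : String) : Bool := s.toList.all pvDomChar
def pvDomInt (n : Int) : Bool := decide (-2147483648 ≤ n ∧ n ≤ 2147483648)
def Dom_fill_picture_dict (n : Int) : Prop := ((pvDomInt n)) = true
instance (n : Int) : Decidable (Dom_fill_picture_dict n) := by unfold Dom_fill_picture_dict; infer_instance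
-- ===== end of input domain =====

-- B replaces A's ring-by-ring decomposition (helper fill_square per ring) by one continuous
-- spiral walk driven by the precomputed run-length list [n, n-1, n-1, ..., 1, 1]; alternative
-- formulation, same asymptotic cost.

-- ===== PORT A =====
-- Python's fill_square returns the tuple (start, x, y) in the n == 1 branch; its caller never
-- uses that tuple (it is always the final loop iteration), so the port carries only start.
def fill_square (n start x y : Int) (d : PySem.Dict (Int × Int) Int) :
    Int × PySem.Dict (Int × Int) Int :=
  if n == 1 then
    (start, d.insert (x, y) start)
  else
    match (PySem.List.pyRange 0 n 1).foldl
        (fun s _ => match s with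
          | (st, x, y, d) => (st - 1, x - 1, y, d.insert (x, y) st)) (start, x, y, d) with
    | (start, x, y, d) =>
    let x := x + 1
    let y := y - 1
    match (PySem.List.pyRange 0 (n - 1) 1).foldl
        (fun s _ => match s with
          | (st, x, y, d) => (st - 1, x, y - 1, d.insert (x, y) st)) (start, x, y, d) with
    | (start, x, y, d) =>
    let x := x + 1
    let y := y + 1
    match (PySem.List.pyRange 0 (n - 1) 1).foldl
        (fun s _ => match s with
          | (st, x, y, d) => (st - 1, x + 1, y, d.insert (x, y) st)) (start, x, y, d) with
    | (start, x, y, d) =>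
    let y := y + 1
    let x := x - 1
    match (PySem.List.pyRange 0 (n - 2) 1).foldl
        (fun s _ => match s with
          | (st, x, y, d) => (st - 1, x, y + 1, d.insert (x, y) st)) (start, x, y, d) with
    | (start, _x, _y, d) => (start, d)

def fill_picture_dict (n : Int) : List (Int × Int × Int) :=
  match (PySem.List.pyRange n (-1) (-2)).foldl
      (fun s i => match s with
        | (start, x, y, d) =>
          match fill_square i start x y d with
          | (start, d) => (start, x - 1, y - 1, d))
      (n * n, n - 1, n - 1, (PySem.Dict.empty : PySem.Dict (Int × Int) Int)) with
  | (_, _, _, d) => d.items.map (fun p => (p.1.1, p.1.2, p.2))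

-- ===== PORT B =====
-- di always lies in {0,1,2,3}, so Python's dirs[di] never raises; pyGetD is exact here.
def fill_picture_dict_alt (n : Int) : List (Int × Int × Int) :=
  let dirs : List (Int × Int) := [(-1, 0), (0, -1), (1, 0), (0, 1)]
  let runs : List Int :=
    (PySem.List.pyRange (n - 1) 0 (-1)).foldl (fun rs k => rs ++ [k] ++ [k]) [n]
  match runs.foldl
      (fun s L => match s with
        | (v, x, y, di, out) =>
          let dxy := PySem.List.pyGetD dirs di ((0 : Int), (0 : Int))
          let ndxy := PySem.List.pyGetD dirs (PySem.Int.mod (di + 1) 4) ((0 : Int), (0 : Int))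
          match (PySem.List.pyRange 0 L 1).foldl
              (fun t _ => match t with
                | (v, x, y, out) => (v - 1, x + dxy.1, y + dxy.2, out.insert (x, y) v))
              (v, x, y, out) with
          | (v, x, y, out) =>
            (v, x + ndxy.1 - dxy.1, y + ndxy.2 - dxy.2, PySem.Int.mod (di + 1) 4, out))
      (n * n, n - 1, n - 1, (0 : Int), (PySem.Dict.empty : PySem.Dict (Int × Int) Int)) with
  | (_, _, _, _, out) => out.items.map (fun p => (p.1.1, p.1.2, p.2))

-- ===== PRECONDITION & SPEC =====
def Spec_fill_picture_dict (n : Int) (out : List (Int × Int × Int)) : Prop := out = fill_picture_dict_alt n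
instance (n : Int) (out : List (Int × Int × Int)) : Decidable (Spec_fill_picture_dict n out) := by unfold Spec_fill_picture_dict; infer_instance

-- ===== CLAIM (what is proved, stated in full; the proofs are below) =====
def Claim_equal_fill_picture_dict : Prop := ∀ (n : Int), Dom_fill_picture_dict n → Spec_fill_picture_dict n (fill_picture_dict n)

-- ===== LEMMAS AND PROOFS =====

def walkD (dx dy : Int) : Nat → Int → Int → Int → PySem.Dict (Int × Int) Int → PySem.Dict (Int × Int) Int
  | 0, _, _, _, d => d
  | Nat.succ k, v, x, y, d => walkD dx dy k (v - 1) (x + dx) (y + dy) (d.insert (x, y) v)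

lemma loopA1 (l : List Int) : ∀ (v x y : Int) (d : PySem.Dict (Int × Int) Int),
    l.foldl (fun s _ => match s with
      | (st, x, y, d) => (st - 1, x - 1, y, d.insert (x, y) st)) (v, x, y, d)
    = (v - l.length, x - l.length, y, walkD (-1) 0 l.length v x y d) := by
  induction l with
  | nil => intro v x y d; simp [walkD]
  | cons a t ih =>
    intro v x y d
    simp only [List.foldl_cons, ih, walkD, List.length_cons]
    push_cast
    ring_nf

lemma loopA2 (l : List Int) : ∀ (v x y : Int) (d : PySem.Dict (Int × Int) Int),
    l.foldl (fun s _ => match s with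
      | (st, x, y, d) => (st - 1, x, y - 1, d.insert (x, y) st)) (v, x, y, d)
    = (v - l.length, x, y - l.length, walkD 0 (-1) l.length v x y d) := by
  induction l with
  | nil => intro v x y d; simp [walkD]
  | cons a t ih =>
    intro v x y d
    simp only [List.foldl_cons, ih, walkD, List.length_cons]
    push_cast
    ring_nf

lemma loopA3 (l : List Int) : ∀ (v x y : Int) (d : PySem.Dict (Int × Int) Int),
    l.foldl (fun s _ => match s with
      | (st, x, y, d) => (st - 1, x + 1, y, d.insert (x, y) st)) (v, x, y, d)
    = (v - l.length, x + l.length, y, walkD 1 0 l.length v x y d) := by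
  induction l with
  | nil => intro v x y d; simp [walkD]
  | cons a t ih =>
    intro v x y d
    simp only [List.foldl_cons, ih, walkD, List.length_cons]
    push_cast
    ring_nf

lemma loopA4 (l : List Int) : ∀ (v x y : Int) (d : PySem.Dict (Int × Int) Int),
    l.foldl (fun s _ => match s with
      | (st, x, y, d) => (st - 1, x, y + 1, d.insert (x, y) st)) (v, x, y, d)
    = (v - l.length, x, y + l.length, walkD 0 1 l.length v x y d) := by
  induction l with
  | nil => intro v x y d; simp [walkD]
  | cons a t ih =>
    intro v x y d
    simp only [List.foldl_cons, ih, walkD, List.length_cons]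
    push_cast
    ring_nf

lemma loopB (dx dy : Int) (l : List Int) : ∀ (v x y : Int) (out : PySem.Dict (Int × Int) Int),
    l.foldl (fun t _ => match t with
      | (v, x, y, out) => (v - 1, x + dx, y + dy, out.insert (x, y) v)) (v, x, y, out)
    = (v - l.length, x + l.length * dx, y + l.length * dy, walkD dx dy l.length v x y out) := by
  induction l with
  | nil => intro v x y out; simp [walkD]
  | cons a t ih =>
    intro v x y out
    simp only [List.foldl_cons, ih, walkD, List.length_cons]
    push_cast
    ring_nf
def ringD (i start x y : Int) (d : PySem.Dict (Int × Int) Int) : PySem.Dict (Int × Int) Int :=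
  walkD 0 1 (i - 2).toNat (start - (3 * i - 2)) x (y - i + 2)
    (walkD 1 0 (i - 1).toNat (start - (2 * i - 1)) (x - i + 2) (y - i + 1)
      (walkD 0 (-1) (i - 1).toNat (start - i) (x - i + 1) (y - 1)
        (walkD (-1) 0 i.toNat start x y d)))

lemma fill_square_eq (i start x y : Int) (d : PySem.Dict (Int × Int) Int) (h : 2 ≤ i) :
    fill_square i start x y d = (start - (4 * i - 4), ringD i start x y d) := by
  have hne : (i == 1) = false := by simp; omega
  unfold fill_square
  rw [hne]
  simp only [Bool.false_eq_true, if_false, loopA1, loopA2, loopA3, loopA4]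
  simp only [PySem.List.length_pyRange_one, sub_zero]
  have h1 : (i.toNat : Int) = i := Int.toNat_of_nonneg (by omega)
  have h2 : ((i - 1).toNat : Int) = i - 1 := Int.toNat_of_nonneg (by omega)
  have h3 : ((i - 2).toNat : Int) = i - 2 := Int.toNat_of_nonneg (by omega)
  rw [h1, h2, h3]
  unfold ringD
  ring_nf
def bBody : (Int × Int × Int × Int × PySem.Dict (Int × Int) Int) → Int →
    (Int × Int × Int × Int × PySem.Dict (Int × Int) Int) :=
  fun s L => match s with
    | (v, x, y, di, out) =>
      let dxy := PySem.List.pyGetD [((-1 : Int), (0 : Int)), (0, -1), (1, 0), (0, 1)] di ((0 : Int), (0 : Int))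
      let ndxy := PySem.List.pyGetD [((-1 : Int), (0 : Int)), (0, -1), (1, 0), (0, 1)] (PySem.Int.mod (di + 1) 4) ((0 : Int), (0 : Int))
      match (PySem.List.pyRange 0 L 1).foldl
          (fun t _ => match t with
            | (v, x, y, out) => (v - 1, x + dxy.1, y + dxy.2, out.insert (x, y) v))
          (v, x, y, out) with
      | (v, x, y, out) =>
        (v, x + ndxy.1 - dxy.1, y + ndxy.2 - dxy.2, PySem.Int.mod (di + 1) 4, out)

lemma alt_eq (n : Int) :
    fill_picture_dict_alt n =
      ((((PySem.List.pyRange (n - 1) 0 (-1)).foldl (fun rs k => rs ++ [k] ++ [k]) [n]).foldl bBody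
        (n * n, n - 1, n - 1, (0 : Int), (PySem.Dict.empty : PySem.Dict (Int × Int) Int))).2.2.2.2).items.map
        (fun p => (p.1.1, p.1.2, p.2)) := rfl

lemma ringB (i v x y : Int) (out : PySem.Dict (Int × Int) Int) (h : 2 ≤ i) :
    List.foldl bBody (v, x, y, (0 : Int), out) [i, i - 1, i - 1, i - 2]
    = (v - (4 * i - 4), x - 1, y - 1, (0 : Int), ringD i v x y out) := by
  simp only [List.foldl_cons, List.foldl_nil, bBody, loopB]
  simp only [show PySem.Int.mod ((0:Int) + 1) 4 = 1 from by decide]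
  simp only [show PySem.Int.mod ((1:Int) + 1) 4 = 2 from by decide]
  simp only [show PySem.Int.mod ((2:Int) + 1) 4 = 3 from by decide]
  simp only [show PySem.Int.mod ((3:Int) + 1) 4 = 0 from by decide]
  simp only [show PySem.List.pyGetD [((-1:Int),(0:Int)),(0,-1),(1,0),(0,1)] 0 ((0:Int),(0:Int)) = (-1,0) from by decide,
             show PySem.List.pyGetD [((-1:Int),(0:Int)),(0,-1),(1,0),(0,1)] 1 ((0:Int),(0:Int)) = (0,-1) from by decide,
             show PySem.List.pyGetD [((-1:Int),(0:Int)),(0,-1),(1,0),(0,1)] 2 ((0:Int),(0:Int)) = (1,0) from by decide,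
             show PySem.List.pyGetD [((-1:Int),(0:Int)),(0,-1),(1,0),(0,1)] 3 ((0:Int),(0:Int)) = (0,1) from by decide]
  simp only [PySem.List.length_pyRange_one, sub_zero]
  have h1 : (i.toNat : Int) = i := Int.toNat_of_nonneg (by omega)
  have h2 : ((i - 1).toNat : Int) = i - 1 := Int.toNat_of_nonneg (by omega)
  have h3 : ((i - 2).toNat : Int) = i - 2 := Int.toNat_of_nonneg (by omega)
  rw [h1, h2, h3]
  unfold ringD
  ring_nf
lemma pyR2_nil (i : Int) (h : i < 0) : PySem.List.pyRange i (-1) (-2) = [] := by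
  simp [PySem.List.pyRange]
  omega

lemma pyR2_cons (i : Int) (h : 0 ≤ i) :
    PySem.List.pyRange i (-1) (-2) = i :: PySem.List.pyRange (i - 2) (-1) (-2) := by
  simp only [PySem.List.pyRange]
  norm_num
  rw [if_pos (by omega : (-1:Int) < i)]
  by_cases h2 : 2 ≤ i
  · rw [if_pos (by omega : (2:Int) < 1 + i)]
    have hc : ((i + 1 + 2 - 1) / 2).toNat = ((i - 2 + 1 + 2 - 1) / 2).toNat + 1 := by omega
    rw [hc, List.range_succ_eq_map]
    simp only [List.map_cons, List.map_map]
    refine List.cons_eq_cons.mpr ⟨by norm_num, ?_⟩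
    apply List.map_congr_left
    intro k _
    simp [Function.comp]
    ring
  · rw [if_neg (by omega : ¬ (2:Int) < 1 + i)]
    have hc : ((i + 1 + 2 - 1) / 2).toNat = 1 := by omega
    rw [hc]
    simp

def aBody : (Int × Int × Int × PySem.Dict (Int × Int) Int) → Int →
    (Int × Int × Int × PySem.Dict (Int × Int) Int) :=
  fun s i => match s with
    | (start, x, y, d) =>
      match fill_square i start x y d with
      | (start, d) => (start, x - 1, y - 1, d)

lemma a_eq (n : Int) :
    fill_picture_dict n =
      (((PySem.List.pyRange n (-1) (-2)).foldl aBody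
        (n * n, n - 1, n - 1, (PySem.Dict.empty : PySem.Dict (Int × Int) Int))).2.2.2).items.map
        (fun p => (p.1.1, p.1.2, p.2)) := rfl

def pairsRuns (m : Int) : List Int := (PySem.List.pyRange m 0 (-1)).flatMap (fun k => [k, k])

lemma runs_foldl (l : List Int) : ∀ init : List Int,
    l.foldl (fun rs k => rs ++ [k] ++ [k]) init = init ++ l.flatMap (fun k => [k, k]) := by
  induction l with
  | nil => intro init; simp
  | cons a t ih => intro init; simp [List.flatMap]

lemma pairs_nil (m : Int) (h : m ≤ 0) : pairsRuns m = [] := by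
  simp [pairsRuns, PySem.List.pyRange_neg_one_eq_nil h]

lemma pairs_cons (m : Int) (h : 0 < m) : pairsRuns m = m :: m :: pairsRuns (m - 1) := by
  rw [pairsRuns, PySem.List.pyRange_neg_one_cons h]
  simp [pairsRuns]

def aRun (i start x y : Int) (d : PySem.Dict (Int × Int) Int) : PySem.Dict (Int × Int) Int :=
  ((PySem.List.pyRange i (-1) (-2)).foldl aBody (start, x, y, d)).2.2.2

def bRun (i start x y : Int) (d : PySem.Dict (Int × Int) Int) : PySem.Dict (Int × Int) Int :=
  ((i :: pairsRuns (i - 1)).foldl bBody (start, x, y, (0 : Int), d)).2.2.2.2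

lemma bBody_dict_nonpos (s : Int × Int × Int × Int × PySem.Dict (Int × Int) Int) (L : Int) (hL : L ≤ 0) :
    (bBody s L).2.2.2.2 = s.2.2.2.2 := by
  obtain ⟨v, x, y, di, out⟩ := s
  simp only [bBody]
  rw [PySem.List.pyRange_one_eq_nil hL]
  simp

lemma foldl_dict_append_zero (l : List Int) (s : Int × Int × Int × Int × PySem.Dict (Int × Int) Int) :
    (List.foldl bBody s (l ++ [0])).2.2.2.2 = (List.foldl bBody s l).2.2.2.2 := by
  rw [List.foldl_append]
  exact bBody_dict_nonpos _ 0 le_rfl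

lemma fill_square_zero (start x y : Int) (d : PySem.Dict (Int × Int) Int) :
    fill_square 0 start x y d = (start, d) := rfl

lemma small_case (i start x y : Int) (d : PySem.Dict (Int × Int) Int) (h : i ≤ 2) :
    aRun i start x y d = bRun i start x y d := by
  by_cases h0 : i < 0
  · rw [aRun, pyR2_nil i h0, List.foldl_nil, bRun, pairs_nil (i - 1) (by omega), List.foldl_cons,
      List.foldl_nil, bBody_dict_nonpos _ i (by omega)]
  · interval_cases i
    · rfl
    · rfl
    · -- i = 2
      rw [aRun, show PySem.List.pyRange 2 (-1) (-2) = [2, 0] from by decide]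
      simp only [List.foldl_cons, List.foldl_nil, aBody, fill_square_eq 2 start x y d (by omega),
        fill_square_zero]
      rw [bRun, show (2:Int) - 1 = 1 from by norm_num, pairs_cons 1 (by omega),
        show (1:Int) - 1 = 0 from by norm_num, pairs_nil 0 (by omega)]
      have hz := foldl_dict_append_zero [2, 1, 1] (start, x, y, 0, d)
      norm_num at hz ⊢
      rw [← hz]
      have hr := ringB 2 start x y d (by omega)
      norm_num at hr
      rw [hr]

lemma main_ind (k : Nat) : ∀ (i start x y : Int) (d : PySem.Dict (Int × Int) Int), i.toNat ≤ k →
    aRun i start x y d = bRun i start x y d := by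
  induction k with
  | zero => intro i start x y d hk; exact small_case i start x y d (by omega)
  | succ k ih =>
    intro i start x y d hk
    by_cases h2 : i ≤ 2
    · exact small_case i start x y d h2
    · have h3 : 3 ≤ i := by omega
      rw [aRun, pyR2_cons i (by omega), List.foldl_cons]
      have ha : aBody (start, x, y, d) i
          = (start - (4 * i - 4), x - 1, y - 1, ringD i start x y d) := by
        simp only [aBody, fill_square_eq i start x y d (by omega)]
      rw [ha]
      rw [bRun, pairs_cons (i - 1) (by omega), show i - 1 - 1 = i - 2 from by ring,
        pairs_cons (i - 2) (by omega)]
      have hsplit : (i :: (i - 1) :: (i - 1) :: (i - 2) :: (i - 2) :: pairsRuns (i - 2 - 1))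
          = [i, i - 1, i - 1, i - 2] ++ ((i - 2) :: pairsRuns (i - 2 - 1)) := rfl
      rw [hsplit, List.foldl_append, ringB i start x y d (by omega)]
      have := ih (i - 2) (start - (4 * i - 4)) (x - 1) (y - 1) (ringD i start x y d) (by omega)
      rw [aRun] at this
      rw [this, bRun]

-- ===== VERDICT (by name: the statement is the Claim_ definition above) =====
theorem fill_picture_dict_spec : Claim_equal_fill_picture_dict := by
  intro n _
  unfold Spec_fill_picture_dict
  rw [a_eq, alt_eq, runs_foldl]
  have : ([n] ++ (PySem.List.pyRange (n - 1) 0 (-1)).flatMap (fun k => [k, k]))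
      = n :: pairsRuns (n - 1) := by simp [pairsRuns]
  rw [this]
  have := main_ind n.toNat n (n * n) (n - 1) (n - 1) PySem.Dict.empty (le_rfl)
  rw [aRun, bRun] at this
  rw [this]
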